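-- pv_equiv track=rewrite | github.com/jasmaa/aoc2021 | beacon-scanner/matrix.py | match_points_translated
-- ===== SOURCE A (Python) =====
-- from typing import List, Tuple
--
-- def match_points_translated(points1, points2) -> List[Tuple[int, int]]:
--     """Find mappings between points with set-translation.
--     """
--     matches = []
--     for i in range(len(points1)):
--         for j in range(len(points2)):
--             if points1[i] == points2[j]:
--                 matches.append((i, j))
--                 break
--     return matches
-- ===== SOURCE B (Python) =====
-- def match_points_translated(points1, points2):
--     """Find mappings between points with set-translation."""
--     # Scatter/group-by: group points1 indices by point value, then a single
--     # pass over points2 emits (i, j) for the whole group at the first j whose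
--     # point matches (the group is popped so later duplicates emit nothing),
--     # and a final sort by i restores points1 order.
--     pending = {}
--     for i, p in enumerate(points1):
--         pending.setdefault(tuple(p), []).append(i)
--     out = []
--     for j, q in enumerate(points2):
--         for i in pending.pop(tuple(q), []):
--             out.append((i, j))
--     out.sort(key=lambda t: t[0])
--     return out
-- ===== Notes on version B (the rewrite author's own statement) =====
-- stated objective: alternative
-- what changed: B inverts the traversal: instead of scanning points2 once per point of points1, it groups points1 indices by point value, makes a single pass over points2 that pops and emits each whole group at the first matching index j, and finally sorts the collected pairs by i (not measured faster on the benchmark inputs).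
import Mathlib
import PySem

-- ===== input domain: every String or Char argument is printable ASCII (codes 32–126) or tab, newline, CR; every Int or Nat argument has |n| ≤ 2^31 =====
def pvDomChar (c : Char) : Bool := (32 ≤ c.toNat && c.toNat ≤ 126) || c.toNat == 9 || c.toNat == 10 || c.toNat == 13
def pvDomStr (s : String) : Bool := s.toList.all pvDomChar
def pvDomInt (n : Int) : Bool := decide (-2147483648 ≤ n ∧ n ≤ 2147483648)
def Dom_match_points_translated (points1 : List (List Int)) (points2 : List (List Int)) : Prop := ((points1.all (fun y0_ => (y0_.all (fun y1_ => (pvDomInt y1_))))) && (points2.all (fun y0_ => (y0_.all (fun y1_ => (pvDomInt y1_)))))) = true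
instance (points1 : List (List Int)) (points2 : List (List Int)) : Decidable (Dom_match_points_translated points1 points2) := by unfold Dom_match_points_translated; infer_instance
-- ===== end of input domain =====

-- B inverts the traversal: it groups points1 indices by value, emits each whole group in ONE pass over points2 (popping the group at its first matching j), and sorts the result by i — a scatter/group-by algorithm instead of A's per-i linear scan.

-- ===== PORT A =====
-- inner 'for j in range(len(points2)): if points1[i] == points2[j]: ms.append((i, j)); break'
def pvInnerA (points1 points2 : List (List Int)) (i : Int) (ms : List (Int × Int)) : List Int → List (Int × Int)
  | [] => ms
  | j :: js =>
    if PySem.List.pyGetD points1 i ([] : List Int) = PySem.List.pyGetD points2 j ([] : List Int) then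
      ms ++ [(i, j)]
    else
      pvInnerA points1 points2 i ms js

def match_points_translated (points1 : List (List Int)) (points2 : List (List Int)) : List (Int × Int) :=
  (PySem.List.pyRange 0 points1.length 1).foldl
    (fun ms i => pvInnerA points1 points2 i ms (PySem.List.pyRange 0 points2.length 1)) []

-- ===== PORT B =====
-- 'for i, p in enumerate(points1): pending.setdefault(tuple(p), []).append(i)'
def pvGroups (points1 : List (List Int)) : PySem.Dict (List Int) (List Int) :=
  (PySem.List.enumerate points1 0).foldl
    (fun d ip => d.modify ip.2 [] (fun g => g ++ [ip.1])) PySem.Dict.empty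

-- one step of 'for j, q in enumerate(points2): for i in pending.pop(tuple(q), []): out.append((i, j))'
def pvEmitStep (s : PySem.Dict (List Int) (List Int) × List (Int × Int)) (jq : Int × List Int) :
    PySem.Dict (List Int) (List Int) × List (Int × Int) :=
  match s.1.get? jq.2 with
  | some g => (s.1.erase jq.2, s.2 ++ g.map (fun i => (i, jq.1)))
  | none => s

def match_points_translated_alt (points1 : List (List Int)) (points2 : List (List Int)) : List (Int × Int) :=
  let r := (PySem.List.enumerate points2 0).foldl pvEmitStep (pvGroups points1, [])
  PySem.List.sorted r.2 (fun t => t.1)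

-- ===== PRECONDITION & SPEC =====
def Spec_match_points_translated (points1 : List (List Int)) (points2 : List (List Int)) (out : List (Int × Int)) : Prop := out = match_points_translated_alt points1 points2
instance (points1 : List (List Int)) (points2 : List (List Int)) (out : List (Int × Int)) : Decidable (Spec_match_points_translated points1 points2 out) := by unfold Spec_match_points_translated; infer_instance

-- ===== CLAIM (what is proved, stated in full; the proofs are below) =====
def Claim_equal_match_points_translated : Prop := ∀ (points1 : List (List Int)) (points2 : List (List Int)), Dom_match_points_translated points1 points2 → Spec_match_points_translated points1 points2 (match_points_translated points1 points2)

-- ===== LEMMAS AND PROOFS =====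

-- the common specification both programs compute: (i, first index of points1[i] in points2)
def pvSpec (points1 points2 : List (List Int)) (s : Int) : List (Int × Int) :=
  (PySem.List.enumerate points1 0).filterMap
    (fun ip => (PySem.List.index? points2 ip.2).map (fun k : Nat => (ip.1, s + (k : Int))))

-- ---- A-side ----

-- A's inner loop from index a finds the first match in points2.drop a.
theorem pvInnerA_spec (points1 points2 : List (List Int)) (i : Int) (m : List (Int × Int)) :
    ∀ (a : Nat), a ≤ points2.length →
      pvInnerA points1 points2 i m (PySem.List.pyRange (a : Int) (points2.length : Int) 1) =
        (match PySem.List.index? (points2.drop a) (PySem.List.pyGetD points1 i ([] : List Int)) with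
          | some k => m ++ [(i, ((a + k : Nat) : Int))]
          | none => m) := by
  intro a
  induction hn : points2.length - a generalizing a with
  | zero =>
    intro ha
    have haeq : a = points2.length := by omega
    subst haeq
    rw [PySem.List.pyRange_one_eq_nil (by omega)]
    simp [pvInnerA, List.drop_of_length_le (le_refl points2.length), PySem.List.index?]
  | succ n ih =>
    intro ha
    have halt : a < points2.length := by omega
    rw [PySem.List.pyRange_one_cons (by exact_mod_cast halt)]
    rw [List.drop_eq_getElem_cons halt]
    have hget2 : PySem.List.pyGetD points2 (a : Int) ([] : List Int) = points2[a] := by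
      rw [PySem.List.pyGetD_natCast, List.getD_eq_getElem _ _ halt]
    unfold pvInnerA
    rw [hget2]
    by_cases heq : PySem.List.pyGetD points1 i ([] : List Int) = points2[a]
    · rw [if_pos heq, heq, PySem.List.index?_cons_self]
      simp
    · rw [if_neg heq]
      have hcast : ((a : Int) + 1) = ((a + 1 : Nat) : Int) := by push_cast; ring
      rw [hcast, ih (a + 1) (by omega) (by omega)]
      rw [PySem.List.index?_cons_of_ne _ (Ne.symm heq)]
      cases hidx : PySem.List.index? (points2.drop (a + 1)) (PySem.List.pyGetD points1 i ([] : List Int)) with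
      | none => simp
      | some k =>
        simp
        omega

theorem pvA_eq_spec (points1 points2 : List (List Int)) :
    match_points_translated points1 points2 = pvSpec points1 points2 0 := by
  unfold match_points_translated pvSpec
  rw [PySem.List.enumerate_eq_map_pyRange points1 ([] : List Int), List.filterMap_map]
  have h0 : (PySem.List.pyRange 0 (points2.length : Int) 1) = (PySem.List.pyRange ((0 : Nat) : Int) (points2.length : Int) 1) := by norm_num
  have hstep : ∀ (ms : List (Int × Int)) (i : Int), i ∈ PySem.List.pyRange 0 (points1.length : Int) 1 →
      pvInnerA points1 points2 i ms (PySem.List.pyRange 0 (points2.length : Int) 1) =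
        ms ++ ((PySem.List.index? points2 (PySem.List.pyGetD points1 i ([] : List Int))).map
          (fun k : Nat => (i, (0 : Int) + (k : Int)))).toList := by
    intro ms i _
    rw [h0, pvInnerA_spec points1 points2 i ms 0 (Nat.zero_le _)]
    simp only [List.drop_zero]
    cases hidx : PySem.List.index? points2 (PySem.List.pyGetD points1 i ([] : List Int)) with
    | none => simp
    | some k => simp
  refine (PySem.List.foldl_congr_mem _ _ _ _ hstep).trans ?_
  rw [PySem.List.foldl_append_eq_flatMap, List.filterMap_eq_flatMap_toList]
  simp [Function.comp]

-- ---- B-side ----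

-- erase, observed through getD (PySem.Dict.erase filters the items list)
theorem pv_find_filter_ne {ν : Type} (k r : List Int) (items : List (List Int × ν)) :
    List.find? (fun p => p.1 == r) (items.filter (fun p => !(p.1 == k))) =
      if r = k then none else List.find? (fun p => p.1 == r) items := by
  induction items with
  | nil => simp only [List.filter_nil, List.find?_nil]; split <;> rfl
  | cons p rest ih =>
    rw [List.filter_cons]
    by_cases hpk : p.1 = k
    · rw [if_neg (by simp [hpk])]
      rw [ih]
      by_cases hrk : r = k
      · simp [hrk]
      · have h2 : (p.1 == r) = false := by
          simp only [beq_eq_false_iff_ne, ne_eq]; intro h; exact hrk (by rw [← h, hpk])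
        rw [if_neg hrk, if_neg hrk, List.find?_cons, h2]
    · rw [if_pos (by simp [hpk]), List.find?_cons, List.find?_cons]
      by_cases hpr : p.1 = r
      · have hrk : ¬ r = k := by intro h; rw [h] at hpr; exact hpk hpr
        have h2 : (p.1 == r) = true := by simp [hpr]
        rw [if_neg hrk, h2]
      · have h2 : (p.1 == r) = false := by simp [hpr]
        rw [h2, ih]

theorem pv_getD_erase {ν : Type} (d : PySem.Dict (List Int) ν) (k r : List Int) (d0 : ν) :
    (d.erase k).getD r d0 = if r = k then d0 else d.getD r d0 := by
  obtain ⟨items⟩ := d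
  simp only [PySem.Dict.erase, PySem.Dict.getD, PySem.Dict.get?]
  rw [pv_find_filter_ne]
  split <;> rfl

-- the emission pass, abstracted to the group FUNCTION (erase = pointwise reset to [])
def pvFg : List (List Int) → Int → (List Int → List Int) → List (Int × Int)
  | [], _, _ => []
  | q :: qs, s, g => (g q).map (fun i => (i, s)) ++ pvFg qs (s + 1) (fun r => if r = q then [] else g r)

theorem pvLoop2_eq (qs : List (List Int)) :
    ∀ (s : Int) (d : PySem.Dict (List Int) (List Int)) (out0 : List (Int × Int)),
      ((PySem.List.enumerate qs s).foldl pvEmitStep (d, out0)).2 =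
        out0 ++ pvFg qs s (fun q => d.getD q []) := by
  induction qs with
  | nil => intro s d out0; simp [PySem.List.enumerate_nil, pvFg]
  | cons q qs ih =>
    intro s d out0
    rw [PySem.List.enumerate_cons]
    simp only [List.foldl_cons, pvFg]
    cases hg : d.get? q with
    | some g =>
      simp only [pvEmitStep, hg]
      rw [ih]
      have hgq : d.getD q [] = g := PySem.Dict.getD_of_get?_eq_some d [] hg
      have hfun : (fun r => (d.erase q).getD r []) = (fun r => if r = q then [] else d.getD r []) := by
        funext r; exact pv_getD_erase d q r []
      rw [hfun, hgq, List.append_assoc]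
    | none =>
      simp only [pvEmitStep, hg]
      rw [ih]
      have hgq : d.getD q [] = [] := PySem.Dict.getD_of_get?_eq_none d [] hg
      have hfun : (fun r => d.getD r []) = (fun r => if r = q then [] else d.getD r []) := by
        funext r; by_cases hr : r = q
        · subst hr; simp [hgq]
        · simp [hr]
      rw [← hfun, hgq]
      simp

theorem pvFg_nilfun (qs : List (List Int)) : ∀ (s : Int), pvFg qs s (fun _ => []) = [] := by
  induction qs with
  | nil => intro s; rfl
  | cons q qs ih =>
    intro s
    simp only [pvFg, List.map_nil, List.nil_append]
    have : (fun r => if r = q then ([] : List Int) else []) = (fun _ => ([] : List Int)) := by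
      funext r; split <;> rfl
    rw [this, ih]

-- appending an index x to the group of value p inserts (x, s + first index of p) into the output (up to permutation)
theorem pvFg_update (qs : List (List Int)) :
    ∀ (s : Int) (g : List Int → List Int) (p : List Int) (x : Int),
      (pvFg qs s (fun r => if r = p then g p ++ [x] else g r)).Perm
        (pvFg qs s g ++ ((PySem.List.index? qs p).map (fun k : Nat => (x, s + (k : Int)))).toList) := by
  induction qs with
  | nil => intro s g p x; simp [pvFg, PySem.List.index?]
  | cons q qs ih =>
    intro s g p x
    by_cases hqp : q = p
    · subst hqp
      simp only [pvFg, if_true, PySem.List.index?_cons_self]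
      have hfun : (fun r => if r = q then ([] : List Int) else if r = q then g q ++ [x] else g r) =
          (fun r => if r = q then [] else g r) := by
        funext r; by_cases hr : r = q <;> simp [hr]
      rw [hfun, List.map_append]
      simp only [Option.map_some, Option.toList_some, List.map_cons, List.map_nil]
      have h0 : s + ((0 : Nat) : Int) = s := by norm_num
      rw [h0, List.append_assoc, List.append_assoc]
      exact List.Perm.append_left _ (List.perm_append_comm.trans (by simp))
    · simp only [pvFg, if_neg hqp]
      have hfun : (fun r => if r = q then ([] : List Int) else if r = p then g p ++ [x] else g r) =
          (fun r => if r = p then (fun r' => if r' = q then ([] : List Int) else g r') p ++ [x]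
                    else (fun r' => if r' = q then ([] : List Int) else g r') r) := by
        funext r
        by_cases hr : r = q
        · subst hr; simp [if_neg hqp]
        · have hpq : ¬ p = q := fun h => hqp h.symm
          by_cases hrp : r = p <;> simp [hr, hrp, hpq]
      rw [hfun]
      refine (List.Perm.append_left _ (ih (s + 1) _ p x)).trans ?_
      rw [PySem.List.index?_cons_of_ne _ (fun h => hqp h)]
      have hT : ((PySem.List.index? qs p).map (fun k : Nat => (x, s + 1 + (k : Int)))).toList =
          (((PySem.List.index? qs p).map (fun k => k + 1)).map (fun k : Nat => (x, s + (k : Int)))).toList := by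
        cases PySem.List.index? qs p with
        | none => rfl
        | some k => simp; ring
      rw [← List.append_assoc, ← hT]

theorem pvGroups_getD (points1 : List (List Int)) (q : List Int) :
    (pvGroups points1).getD q [] =
      ((PySem.List.enumerate points1 0).filter (fun ip => ip.2 == q)).map (fun ip => ip.1) := by
  unfold pvGroups
  have hswap : (PySem.List.enumerate points1 0).foldl
      (fun d ip => d.modify ip.2 [] (fun g => g ++ [ip.1])) PySem.Dict.empty =
      ((PySem.List.enumerate points1 0).map Prod.swap).foldl
      (fun d p => d.modify p.1 [] (fun g => g ++ [p.2])) PySem.Dict.empty := by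
    rw [List.foldl_map]; simp [Prod.swap]
  rw [hswap, PySem.Dict.getD_foldl_modify_append]
  simp only [PySem.Dict.getD_empty, List.nil_append, List.filter_map, List.map_map]
  rfl

theorem pvFg_groups_perm (points2 : List (List Int)) (s : Int) (points1 : List (List Int)) :
    (pvFg points2 s (fun q => (pvGroups points1).getD q [])).Perm (pvSpec points1 points2 s) := by
  induction points1 using List.reverseRecOn with
  | nil =>
    have h1 : (fun q => (pvGroups []).getD q []) = (fun _ => ([] : List Int)) := by
      funext q; rw [pvGroups_getD]; rfl
    rw [h1, pvFg_nilfun]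
    simp [pvSpec, PySem.List.enumerate_nil]
  | append_singleton xs p ih =>
    have hfun : (fun q => (pvGroups (xs ++ [p])).getD q []) =
        (fun r => if r = p then (pvGroups xs).getD p [] ++ [((xs.length : Int))]
                  else (pvGroups xs).getD r []) := by
      funext q
      by_cases hq : q = p
      · subst hq
        rw [pvGroups_getD, pvGroups_getD, if_pos rfl, PySem.List.enumerate_append,
          List.filter_append, List.map_append]
        simp [PySem.List.enumerate_cons, PySem.List.enumerate_nil]
      · rw [pvGroups_getD, if_neg hq, pvGroups_getD, PySem.List.enumerate_append,
          List.filter_append, List.map_append]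
        have hnil : ((PySem.List.enumerate [p] ((0:Int) + (xs.length : Int))).filter
            (fun ip => ip.2 == q)) = [] := by
          simp [PySem.List.enumerate_cons, PySem.List.enumerate_nil, Ne.symm hq]
        rw [hnil]
        simp
    rw [hfun]
    refine (pvFg_update points2 s (fun q => (pvGroups xs).getD q []) p (xs.length : Int)).trans ?_
    have hspec : pvSpec (xs ++ [p]) points2 s = pvSpec xs points2 s ++
        ((PySem.List.index? points2 p).map (fun k : Nat => ((xs.length : Int), s + (k : Int)))).toList := by
      unfold pvSpec
      rw [PySem.List.enumerate_append, List.filterMap_append]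
      congr 1
      cases h : PySem.List.index? points2 p with
      | none =>
        rw [PySem.List.index?_eq_idxOf?] at h
        simp [PySem.List.enumerate_cons, PySem.List.enumerate_nil, h]
      | some k =>
        rw [PySem.List.index?_eq_idxOf?] at h
        simp [PySem.List.enumerate_cons, PySem.List.enumerate_nil, h]
    rw [hspec]
    exact ih.append (List.Perm.refl _)

theorem pvSpec_pairwise (points1 points2 : List (List Int)) (s : Int) :
    (pvSpec points1 points2 s).Pairwise (fun a b => a.1 < b.1) := by
  unfold pvSpec
  rw [List.pairwise_filterMap]
  have h := PySem.List.pairwise_lt_enumerate points1 (0 : Int)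
  refine h.imp ?_
  intro a b hab c hc c' hc'
  cases hia : PySem.List.index? points2 a.2 with
  | none => rw [hia] at hc; simp at hc
  | some k =>
    cases hib : PySem.List.index? points2 b.2 with
    | none => rw [hib] at hc'; simp at hc'
    | some k' =>
      rw [hia] at hc; rw [hib] at hc'
      simp only [Option.map_some, Option.some.injEq] at hc hc'
      rw [← hc, ← hc']
      simpa using hab

-- ===== VERDICT (by name: the statement is the Claim_ definition above) =====
theorem match_points_translated_spec : Claim_equal_match_points_translated := by
  intro points1 points2 _
  unfold Spec_match_points_translated match_points_translated_alt
  rw [pvA_eq_spec]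
  rw [PySem.List.sorted_eq_of_perm_of_pairwise_lt _ _ _ ?hperm ?hpw]
  case hperm =>
    rw [pvLoop2_eq points2 0 (pvGroups points1) []]
    simp only [List.nil_append]
    exact (pvFg_groups_perm points2 0 points1).symm
  case hpw => exact pvSpec_pairwise points1 points2 0
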